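-- pv_equiv track=rewrite | github.com/learnore/helloshen | z_huawei_od/24_od/100/21_统计.py | can_get_award
-- ===== SOURCE A (Python) =====
-- from collections import Counter
--
-- def can_get_award(input_datas):
--     count = Counter(input_datas)
--
--     # 任意连续7次考勤，缺勤、迟到、早退超过3次
--     if len(input_datas) > 7:
--         for i in range(0, len(input_datas) - 7):
--             new_count = Counter(input_datas[i:i+7])
--             if new_count["absent"] + new_count["late"] + new_count["leaveearly"] > 3:
--                 return False
--     else:
--         if count["absent"] + count["late"] + count["leaveearly"] > 3:
--             return False
--
--     # 缺勤超过一次就没有全勤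
--     if count["absent"] > 1:
--         return False
--
--     # 连续的迟到、早退时，则没有全勤
--     late_leaveearly = 0
--     for item in range(len(input_datas)):
--         if item == "late" or item == "leaveearly":
--             late_leaveearly += 1
--             if late_leaveearly == 2:
--                 return False
--         else:
--             late_leaveearly = 0
--
--     return True
-- ===== SOURCE B (Python) =====
-- def can_get_award(input_datas):
--     bad = [1 if x in ("absent", "late", "leaveearly") else 0 for x in input_datas]
--     pre = [0]
--     for b in bad:
--         pre.append(pre[-1] + b)
--     n = len(input_datas)
--     if n > 7:
--         if any(pre[i + 7] - pre[i] > 3 for i in range(n - 7)):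
--             return False
--     else:
--         if pre[n] > 3:
--             return False
--     return input_datas.count("absent") <= 1
-- ===== Notes on version B (the rewrite author's own statement) =====
-- stated objective: simpler
-- what changed: Replaces the per-window Counter rebuild with a single 0/1 bad-marker list plus a prefix-sum array (each window check is one subtraction), and drops A's dead third loop, which compares ints to strings and never fires.
import Mathlib
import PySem

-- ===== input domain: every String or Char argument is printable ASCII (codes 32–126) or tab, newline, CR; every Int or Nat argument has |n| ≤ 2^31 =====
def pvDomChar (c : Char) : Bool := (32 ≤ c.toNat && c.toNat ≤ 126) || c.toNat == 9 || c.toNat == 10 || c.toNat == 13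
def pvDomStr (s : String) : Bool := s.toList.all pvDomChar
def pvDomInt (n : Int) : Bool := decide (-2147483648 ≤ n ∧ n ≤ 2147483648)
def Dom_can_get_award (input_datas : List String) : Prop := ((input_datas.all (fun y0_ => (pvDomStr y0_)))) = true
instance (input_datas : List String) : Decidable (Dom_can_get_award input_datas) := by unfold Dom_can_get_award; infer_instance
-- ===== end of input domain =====

-- B replaces the per-window Counter rebuild with a 0/1 bad-marker list plus a prefix-sum
-- array (each window check is one subtraction) and drops A's dead third loop (int == str
-- never fires); objective: simpler. Return-value equivalence; neither version mutates its argument.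

-- ===== PORT A =====
-- the window loop of A: for each start index, rebuild a Counter of the 7-slice; early return False
def aWin (xs : List String) : List Int → Bool
  | [] => true
  | i :: rest =>
    let nc := PySem.Dict.counter (PySem.List.slice xs (some i) (some (i + 7)))
    if nc.getD "absent" 0 + nc.getD "late" 0 + nc.getD "leaveearly" 0 > 3 then false
    else aWin xs rest

-- A's third loop: `item` ranges over ints, so `item == "late" or item == "leaveearly"`
-- compares an int to a str, which is False in Python; ported literally as the Bool `false`.
def aLoop3 : List Int → Int → Bool
  | [], _ => true
  | _ :: rest, lle =>
    if (false : Bool) then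
      (if lle + 1 = 2 then false else aLoop3 rest (lle + 1))
    else aLoop3 rest 0

def can_get_award (input_datas : List String) : Bool :=
  let count := PySem.Dict.counter input_datas
  let n : Int := input_datas.length
  let phase1 : Bool :=
    if n > 7 then aWin input_datas (PySem.List.pyRange 0 (n - 7) 1)
    else !(count.getD "absent" 0 + count.getD "late" 0 + count.getD "leaveearly" 0 > 3)
  if phase1 then
    if count.getD "absent" 0 > 1 then false
    else aLoop3 (PySem.List.pyRange 0 n 1) 0
  else false

-- ===== PORT B =====
def bBad (x : String) : Int :=
  if x = "absent" ∨ x = "late" ∨ x = "leaveearly" then 1 else 0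

def can_get_award_alt (input_datas : List String) : Bool :=
  let bad := input_datas.map bBad
  let pre := bad.foldl (fun acc b => acc ++ [PySem.List.pyGetD acc (-1) 0 + b]) [(0 : Int)]
  let n : Int := input_datas.length
  let ok1 : Bool :=
    if n > 7 then
      !((PySem.List.pyRange 0 (n - 7) 1).any (fun i =>
          PySem.List.pyGetD pre (i + 7) 0 - PySem.List.pyGetD pre i 0 > 3))
    else !(PySem.List.pyGetD pre n 0 > 3)
  if ok1 then decide ((input_datas.count "absent" : Int) ≤ 1) else false

-- ===== PRECONDITION & SPEC =====
def Spec_can_get_award (input_datas : List String) (out : Bool) : Prop := out = can_get_award_alt input_datas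
instance (input_datas : List String) (out : Bool) : Decidable (Spec_can_get_award input_datas out) := by unfold Spec_can_get_award; infer_instance

-- ===== CLAIM (what is proved, stated in full; the proofs are below) =====
def Claim_equal_can_get_award : Prop := ∀ (input_datas : List String), Dom_can_get_award input_datas → Spec_can_get_award input_datas (can_get_award input_datas)

-- ===== LEMMAS AND PROOFS =====

-- running prefix sums starting after accumulated sum s
def presAux (s : Int) : List Int → List Int
  | [] => []
  | b :: rest => (s + b) :: presAux (s + b) rest

lemma fold_pre (l : List Int) (a : List Int) (x : Int) :
    l.foldl (fun acc b => acc ++ [PySem.List.pyGetD acc (-1) 0 + b]) (a ++ [x])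
      = (a ++ [x]) ++ presAux x l := by
  induction l generalizing a x with
  | nil => simp [presAux]
  | cons b rest ih =>
    simp only [List.foldl_cons, PySem.List.pyGetD_neg_one_append_singleton, presAux]
    have := ih (a ++ [x]) (x + b)
    simpa [List.append_assoc] using this

lemma presAux_getD (s : Int) (l : List Int) (k : Nat) (hk : k < l.length) :
    (presAux s l).getD k 0 = s + (l.take (k + 1)).sum := by
  induction l generalizing s k with
  | nil => simp at hk
  | cons b rest ih =>
    cases k with
    | zero => simp [presAux]
    | succ k =>
      simp only [presAux, List.getD_cons_succ, List.take_succ_cons, List.sum_cons]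
      rw [ih (s + b) k (by simpa using hk)]
      ring

lemma pre_getD (l : List Int) (m : Nat) (hm : m ≤ l.length) :
    (0 :: presAux 0 l).getD m 0 = (l.take m).sum := by
  cases m with
  | zero => simp
  | succ m =>
    simp only [List.getD_cons_succ]
    rw [presAux_getD 0 l m (by omega)]
    simp

lemma three_counts (s : List String) :
    (s.count "absent" : Int) + s.count "late" + s.count "leaveearly" = (s.map bBad).sum := by
  induction s with
  | nil => simp
  | cons a rest ih =>
    simp only [List.count_cons, List.map_cons, List.sum_cons, bBad]
    by_cases h1 : a = "absent" <;> by_cases h2 : a = "late" <;> by_cases h3 : a = "leaveearly" <;>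
      simp_all <;> omega

lemma aLoop3_true (l : List Int) (s : Int) : aLoop3 l s = true := by
  induction l generalizing s with
  | nil => rfl
  | cons i rest ih => simpa [aLoop3] using ih 0

lemma aWin_eq_all (xs : List String) (l : List Int) :
    aWin xs l = l.all (fun i =>
      !((PySem.Dict.counter (PySem.List.slice xs (some i) (some (i + 7)))).getD "absent" 0
        + (PySem.Dict.counter (PySem.List.slice xs (some i) (some (i + 7)))).getD "late" 0
        + (PySem.Dict.counter (PySem.List.slice xs (some i) (some (i + 7)))).getD "leaveearly" 0 > 3)) := by
  induction l with
  | nil => rfl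
  | cons i rest ih =>
    simp only [aWin, List.all_cons]
    split_ifs with h <;> simp_all

lemma all_eq_bang_any (l : List Int) (p q : Int → Bool)
    (h : ∀ x ∈ l, p x = !q x) : l.all p = !(l.any q) := by
  induction l with
  | nil => rfl
  | cons a rest ih =>
    simp only [List.all_cons, List.any_cons, Bool.not_or]
    rw [h a (by simp), ih (fun x hx => h x (by simp [hx]))]

-- the window condition, a and b sides, agree on every index of the range
lemma window_eq (xs : List String) (i : Int) (h0 : 0 ≤ i) (h7 : i + 7 ≤ (xs.length : Int)) :
    ((PySem.Dict.counter (PySem.List.slice xs (some i) (some (i + 7)))).getD "absent" 0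
      + (PySem.Dict.counter (PySem.List.slice xs (some i) (some (i + 7)))).getD "late" 0
      + (PySem.Dict.counter (PySem.List.slice xs (some i) (some (i + 7)))).getD "leaveearly" 0)
    = PySem.List.pyGetD (0 :: presAux 0 (xs.map bBad)) (i + 7) 0
      - PySem.List.pyGetD (0 :: presAux 0 (xs.map bBad)) i 0 := by
  obtain ⟨k, rfl⟩ := Int.eq_ofNat_of_zero_le h0
  have hklen : k + 7 ≤ xs.length := by exact_mod_cast h7
  have hslice : PySem.List.slice xs (some (k : Int)) (some ((k : Int) + 7))
      = (xs.drop k).take 7 := by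
    have := PySem.List.slice_natCast_add (xs := xs) (j := k) (n := 7)
    simpa using this
  rw [hslice]
  simp only [PySem.Dict.getD_counter]
  have h1 : PySem.List.pyGetD (0 :: presAux 0 (xs.map bBad)) ((k : Int) + 7) 0
      = ((xs.map bBad).take (k + 7)).sum := by
    have : ((k : Int) + 7) = ((k + 7 : Nat) : Int) := by omega
    rw [this, PySem.List.pyGetD_natCast]
    exact pre_getD _ _ (by simpa using hklen)
  have h2 : PySem.List.pyGetD (0 :: presAux 0 (xs.map bBad)) (k : Int) 0
      = ((xs.map bBad).take k).sum := by
    rw [PySem.List.pyGetD_natCast]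
    exact pre_getD _ _ (by simp; omega)
  rw [h1, h2]
  have hsplit : ((xs.map bBad).take (k + 7)).sum
      = ((xs.map bBad).take k).sum + (((xs.map bBad).drop k).take 7).sum := by
    rw [List.take_add, List.sum_append]
  rw [hsplit]
  have hmap : ((xs.map bBad).drop k).take 7 = ((xs.drop k).take 7).map bBad := by
    rw [List.map_take, List.map_drop]
  rw [hmap, ← three_counts]
  ring

lemma pre_list_eq (xs : List String) :
    (xs.map bBad).foldl (fun acc b => acc ++ [PySem.List.pyGetD acc (-1) 0 + b]) [(0 : Int)]
      = 0 :: presAux 0 (xs.map bBad) := by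
  have := fold_pre (xs.map bBad) [] 0
  simpa using this

theorem can_get_award_eq (input_datas : List String) :
    can_get_award input_datas = can_get_award_alt input_datas := by
  unfold can_get_award can_get_award_alt
  simp only [pre_list_eq]
  set xs := input_datas with hxs
  set n : Int := (xs.length : Int) with hn
  have hphase1 :
      (if n > 7 then aWin xs (PySem.List.pyRange 0 (n - 7) 1)
       else !((PySem.Dict.counter xs).getD "absent" 0 + (PySem.Dict.counter xs).getD "late" 0
              + (PySem.Dict.counter xs).getD "leaveearly" 0 > 3))
    = (if n > 7 then
         !((PySem.List.pyRange 0 (n - 7) 1).any (fun i =>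
             PySem.List.pyGetD (0 :: presAux 0 (xs.map bBad)) (i + 7) 0
               - PySem.List.pyGetD (0 :: presAux 0 (xs.map bBad)) i 0 > 3))
       else !(PySem.List.pyGetD (0 :: presAux 0 (xs.map bBad)) n 0 > 3)) := by
    split_ifs with hbig
    · rw [aWin_eq_all]
      apply all_eq_bang_any
      intro i hi
      rw [PySem.List.mem_pyRange_one] at hi
      rw [window_eq xs i hi.1 (by omega)]
    · have : PySem.List.pyGetD (0 :: presAux 0 (xs.map bBad)) n 0 = (xs.map bBad).sum := by
        rw [hn, PySem.List.pyGetD_natCast]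
        have h := pre_getD (xs.map bBad) xs.length (by simp)
        have hfull : (xs.map bBad).take xs.length = xs.map bBad := by
          apply List.take_of_length_le; simp
        rw [hfull] at h
        simpa using h
      rw [this]
      simp only [PySem.Dict.getD_counter]
      rw [three_counts]
  rw [hphase1]
  have hcnt : (PySem.Dict.counter xs).getD "absent" 0 = (xs.count "absent" : Int) :=
    PySem.Dict.getD_counter xs "absent"
  rw [hcnt]
  simp only [aLoop3_true]
  split_ifs <;>
    first
      | rfl
      | (rw [eq_comm, decide_eq_false_iff_not]; omega)
      | (rw [eq_comm, decide_eq_true_eq]; omega)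

-- ===== VERDICT (by name: the statement is the Claim_ definition above) =====
theorem can_get_award_spec : Claim_equal_can_get_award := by
  intro input_datas _
  unfold Spec_can_get_award
  exact can_get_award_eq input_datas
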